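-- pv_equiv track=rewrite | github.com/zain08816/Coding-Problems | Daily_Challenges/#78 stringsCrossover.py | stringsCrossover
-- ===== SOURCE A (Python) =====
-- def stringsCrossover(arr, result):
--     wrong = 0
--     pairs = []
--
--     #creating pairs
--     for p1 in range(len(arr)):
--         for p2 in range(p1+1, len(arr)):
--             pairs.append((arr[p1], arr[p2]))
--
--     for pair in pairs:
--         t = True
--         for i in range(len(pair[0])):
--             if not (pair[1][i] == result[i] or pair[0][i] == result[i]):
--                 t = False
--         if t == False:
--             wrong += 1
--
--     return len(pairs) - wrong
-- ===== SOURCE B (Python) =====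
-- def stringsCrossover(arr, result):
--     # Precompute one mismatch bitmask per string (bit i set iff s[i] != result[i]);
--     # a pair crossovers iff their masks share no bit.
--     masks = []
--     for s in arr:
--         m = 0
--         for i, (c, r) in enumerate(zip(s, result)):
--             if c != r:
--                 m |= 1 << i
--         masks.append(m)
--     good = 0
--     for i in range(len(masks)):
--         for j in range(i + 1, len(masks)):
--             if masks[i] & masks[j] == 0:
--                 good += 1
--     return good
-- ===== Notes on version B (the rewrite author's own statement) =====
-- stated objective: faster
-- what changed: Instead of materialising all pairs and rescanning every position of every pair, B precomputes one mismatch bitmask per string and declares a pair valid iff the bitwise AND of the two masks is zero; it counts good pairs directly instead of counting bad ones and subtracting.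
import Mathlib
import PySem

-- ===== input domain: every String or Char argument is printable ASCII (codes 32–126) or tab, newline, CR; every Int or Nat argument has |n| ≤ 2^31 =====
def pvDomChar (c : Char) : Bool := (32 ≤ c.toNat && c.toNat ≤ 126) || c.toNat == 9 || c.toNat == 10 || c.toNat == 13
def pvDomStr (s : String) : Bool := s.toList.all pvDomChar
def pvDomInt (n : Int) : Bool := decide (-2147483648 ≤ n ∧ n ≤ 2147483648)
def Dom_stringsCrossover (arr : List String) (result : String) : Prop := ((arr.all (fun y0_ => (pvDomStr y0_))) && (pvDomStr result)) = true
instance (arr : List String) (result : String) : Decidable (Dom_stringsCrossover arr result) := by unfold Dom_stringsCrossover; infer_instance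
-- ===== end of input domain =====

-- B replaces A's pairs-list + per-pair position rescan by per-string mismatch bitmasks
-- ANDed per pair (faster by a constant word-packing factor; counts good pairs directly).


-- ===== PORT A =====
-- literal transliteration of A: build the pairs list, then count the pairs that fail
-- the positionwise test, and return len(pairs) - wrong.
def stringsCrossover (arr : List String) (result : String) : Int :=
  let n : Int := (arr.length : Int)
  let pairs : List (String × String) :=
    (PySem.List.pyRange 0 n 1).foldl (fun ps p1 =>
      (PySem.List.pyRange (p1 + 1) n 1).foldl (fun ps p2 =>
        ps ++ [(PySem.List.pyGetD arr p1 "", PySem.List.pyGetD arr p2 "")]) ps) []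
  let wrong : Int :=
    pairs.foldl (fun wrong pair =>
      let t : Bool :=
        (PySem.List.pyRange 0 (PySem.Str.len pair.1) 1).foldl (fun t i =>
          if ¬ (PySem.List.pyGetD pair.2.toList i ' ' = PySem.List.pyGetD result.toList i ' ' ∨
                PySem.List.pyGetD pair.1.toList i ' ' = PySem.List.pyGetD result.toList i ' ')
          then false else t) true
      if t = false then wrong + 1 else wrong) 0
  (pairs.length : Int) - wrong

-- ===== PORT B =====
-- mismatch bitmask of s against result: bit i set iff i-th chars of zip(s,result) differ
-- (enumerate index is ≥ 0, so .toNat is exact for Python's 1 << i)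
def pvMaskStep (m : Nat) (p : Int × (Char × Char)) : Nat :=
  if p.2.1 ≠ p.2.2 then m ||| (1 <<< p.1.toNat) else m

def pvMask (s r : List Char) : Nat :=
  (PySem.List.enumerate (s.zip r) 0).foldl pvMaskStep 0

def stringsCrossover_alt (arr : List String) (result : String) : Int :=
  let masks : List Nat :=
    arr.foldl (fun ms s => ms ++ [pvMask s.toList result.toList]) []
  let n : Int := (masks.length : Int)
  (PySem.List.pyRange 0 n 1).foldl (fun good i =>
    (PySem.List.pyRange (i + 1) n 1).foldl (fun good j =>
      if PySem.List.pyGetD masks i 0 &&& PySem.List.pyGetD masks j 0 = 0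
      then good + 1 else good) good) 0

-- ===== PRECONDITION & SPEC =====
-- Pre_ is exactly A's return domain: A indexes arr[p2] and result at every position of
-- arr[p1] for each p1 < p2, so it raises IndexError unless every earlier string is no
-- longer than every later string, and no string except possibly the last is longer
-- than result.  Nothing A returns on is excluded.
def Pre_stringsCrossover (arr : List String) (result : String) : Prop :=
  List.Pairwise (fun a b => a.toList.length ≤ b.toList.length) arr ∧
  ∀ s ∈ arr.dropLast, s.toList.length ≤ result.toList.length

instance (arr : List String) (result : String) : Decidable (Pre_stringsCrossover arr result) := by
  unfold Pre_stringsCrossover; infer_instance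

def pvWitness_stringsCrossover : List String × String := (["ab", "ba"], "aa")

def Spec_stringsCrossover (arr : List String) (result : String) (out : Int) : Prop :=
  out = stringsCrossover_alt arr result
instance (arr : List String) (result : String) (out : Int) : Decidable (Spec_stringsCrossover arr result out) := by
  unfold Spec_stringsCrossover; infer_instance

-- ===== CLAIM (what is proved, stated in full; the proofs are below) =====
def Claim_equal_stringsCrossover : Prop := ∀ (arr : List String) (result : String), Dom_stringsCrossover arr result → Pre_stringsCrossover arr result → Spec_stringsCrossover arr result (stringsCrossover arr result)


-- ===== LEMMAS AND PROOFS =====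

-- A's per-pair inner loop, specialised to the pair (arr[i], arr[j]) (proof-side helper)
def pvT (arr : List String) (result : String) (i j : Int) : Bool :=
  (PySem.List.pyRange 0 (PySem.Str.len (PySem.List.pyGetD arr i "")) 1).foldl (fun t idx =>
    if ¬ (PySem.List.pyGetD (PySem.List.pyGetD arr j "").toList idx ' ' = PySem.List.pyGetD result.toList idx ' ' ∨
          PySem.List.pyGetD (PySem.List.pyGetD arr i "").toList idx ' ' = PySem.List.pyGetD result.toList idx ' ')
    then false else t) true

theorem pv_and_eq_zero (a b : Nat) : a &&& b = 0 ↔ ∀ k, a.testBit k = false ∨ b.testBit k = false := by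
  constructor
  · intro h k
    have := congrArg (Nat.testBit · k) h
    simp [Nat.testBit_and] at this
    rcases Bool.eq_false_or_eq_true (a.testBit k) with ha | ha
    · exact Or.inr (this ha)
    · exact Or.inl ha
  · intro h
    apply Nat.eq_of_testBit_eq
    intro k
    simp only [Nat.testBit_and, Nat.zero_testBit]
    rcases h k with h | h <;> simp [h]

theorem pv_testBit_maskFold (l : List (Char × Char)) (s0 m0 k : Nat) :
    ((PySem.List.enumerate l (s0 : Int)).foldl pvMaskStep m0).testBit k
      = (m0.testBit k || (decide (s0 ≤ k) && (l[k - s0]?.any (fun p => decide (p.1 ≠ p.2))))) := by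
  induction l generalizing s0 m0 with
  | nil => simp [PySem.List.enumerate]
  | cons x t ih =>
    rw [PySem.List.enumerate_cons, List.foldl_cons]
    have hcast : ((s0 : Int) + 1) = ((s0 + 1 : Nat) : Int) := by push_cast; ring
    rw [hcast, ih]
    rcases Nat.lt_trichotomy k s0 with h | h | h
    · have h1 : ¬ (s0 ≤ k) := by omega
      have h2 : ¬ (s0 + 1 ≤ k) := by omega
      simp only [pvMaskStep, h1, h2]
      split_ifs with hm
      · simp [Nat.testBit_or, Nat.one_shiftLeft, Nat.testBit_two_pow]
        omega
      · rfl
    · subst h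
      have h2 : ¬ (k + 1 ≤ k) := by omega
      simp only [pvMaskStep, h2, Nat.sub_self, List.getElem?_cons_zero, Option.any_some,
        le_refl, decide_true, Bool.true_and]
      split_ifs with hm
      · simp [Nat.testBit_or, Nat.one_shiftLeft, hm]
      · simp [hm]
    · have h1 : s0 ≤ k := by omega
      have h2 : s0 + 1 ≤ k := by omega
      have h3 : k - s0 = (k - (s0 + 1)) + 1 := by omega
      simp only [h1, h2, decide_true, Bool.true_and, h3, List.getElem?_cons_succ]
      have : (pvMaskStep m0 ((s0 : Int), x)).testBit k = m0.testBit k := by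
        simp only [pvMaskStep]
        split_ifs with hm
        · simp [Nat.testBit_or, Nat.one_shiftLeft, Nat.testBit_two_pow]
          omega
        · rfl
      rw [this]

theorem pv_mask_bit (s r : List Char) (k : Nat) :
    (pvMask s r).testBit k = true ↔ k < s.length ∧ k < r.length ∧ s.getD k ' ' ≠ r.getD k ' ' := by
  have h := pv_testBit_maskFold (s.zip r) 0 0 k
  unfold pvMask
  rw [show ((0 : Nat) : Int) = (0 : Int) from rfl] at h
  rw [h]
  by_cases hk : k < s.length ∧ k < r.length
  · have hz : (s.zip r)[k]? = some (s[k], r[k]) := by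
      rw [List.getElem?_eq_getElem (by simp [List.length_zip]; omega)]
      simp [List.getElem_zip]
    simp [hk.1, hk.2]
  · have hz : (s.zip r)[k]? = none := by
      apply List.getElem?_eq_none
      simp [List.length_zip]; omega
    simp [hz]; omega

theorem pv_disjoint_iff (a b r : List Char) (hab : a.length ≤ b.length) (har : a.length ≤ r.length) :
    (pvMask a r &&& pvMask b r = 0) ↔
      ∀ k : Nat, k < a.length → (b.getD k ' ' = r.getD k ' ' ∨ a.getD k ' ' = r.getD k ' ') := by
  rw [pv_and_eq_zero]
  constructor
  · intro h k hk
    rcases h k with h | h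
    · right
      by_contra hne
      rw [(pv_mask_bit a r k).mpr ⟨hk, by omega, hne⟩] at h
      exact absurd h (by simp)
    · left
      by_contra hne
      rw [(pv_mask_bit b r k).mpr ⟨by omega, by omega, hne⟩] at h
      exact absurd h (by simp)
  · intro h k
    rcases Bool.eq_false_or_eq_true ((pvMask a r).testBit k) with ha | ha
    · obtain ⟨h1, h2, h3⟩ := (pv_mask_bit a r k).mp ha
      rcases h k h1 with hb | hb
      · right
        rcases Bool.eq_false_or_eq_true ((pvMask b r).testBit k) with hbb | hbb
        · obtain ⟨_, _, h6⟩ := (pv_mask_bit b r k).mp hbb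
          exact absurd hb h6
        · exact hbb
      · exact absurd hb h3
    · exact Or.inl ha

theorem pv_good_eq (aL bL r : List Char) (hab : aL.length ≤ bL.length) (har : aL.length ≤ r.length) :
    (!((PySem.List.pyRange 0 (aL.length : Int) 1).any (fun idx =>
        decide (¬ (PySem.List.pyGetD bL idx ' ' = PySem.List.pyGetD r idx ' ' ∨
                   PySem.List.pyGetD aL idx ' ' = PySem.List.pyGetD r idx ' ')))))
      = decide (pvMask aL r &&& pvMask bL r = 0) := by
  have key : ((PySem.List.pyRange 0 (aL.length : Int) 1).any (fun idx =>
        decide (¬ (PySem.List.pyGetD bL idx ' ' = PySem.List.pyGetD r idx ' ' ∨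
                   PySem.List.pyGetD aL idx ' ' = PySem.List.pyGetD r idx ' ')))) = false
      ↔ (pvMask aL r &&& pvMask bL r = 0) := by
    rw [List.any_eq_false, pv_disjoint_iff aL bL r hab har]
    constructor
    · intro h k hk
      have hmem : ((k : Int)) ∈ PySem.List.pyRange 0 (aL.length : Int) 1 := by
        rw [PySem.List.mem_pyRange_one]
        constructor
        · exact_mod_cast Nat.zero_le k
        · exact_mod_cast hk
      have h2 := h _ hmem
      simp only [PySem.List.pyGetD_natCast, decide_eq_true_eq, not_not] at h2
      exact h2
    · intro h x hx
      rw [PySem.List.mem_pyRange_one] at hx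
      have hx0 : x = ((x.toNat : Nat) : Int) := by omega
      rw [hx0]
      simp only [PySem.List.pyGetD_natCast, decide_eq_true_eq, not_not]
      exact h x.toNat (by omega)
  rcases Bool.eq_false_or_eq_true ((PySem.List.pyRange 0 (aL.length : Int) 1).any (fun idx =>
        decide (¬ (PySem.List.pyGetD bL idx ' ' = PySem.List.pyGetD r idx ' ' ∨
                   PySem.List.pyGetD aL idx ' ' = PySem.List.pyGetD r idx ' ')))) with h | h
  · rw [h]
    have : ¬ (pvMask aL r &&& pvMask bL r = 0) := by
      intro hc
      rw [key.mpr hc] at h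
      cases h
    simp [this]
  · rw [h]
    simp [key.mp h]

theorem pv_B_eq (arr : List String) (result : String) :
    stringsCrossover_alt arr result =
      ((PySem.List.pyRange 0 (arr.length : Int) 1).map (fun i =>
        (((PySem.List.pyRange (i + 1) (arr.length : Int) 1).countP (fun j =>
          decide (PySem.List.pyGetD (arr.map (fun s => pvMask s.toList result.toList)) i 0 &&&
                  PySem.List.pyGetD (arr.map (fun s => pvMask s.toList result.toList)) j 0 = 0)) : Nat) : Int))).sum := by
  simp only [stringsCrossover_alt]
  rw [PySem.List.foldl_append_singleton_eq_map]
  simp only [List.nil_append, List.length_map]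
  refine (PySem.List.foldl_congr_mem _ _ (fun good i => good +
        (((PySem.List.pyRange (i + 1) (arr.length : Int) 1).countP (fun j =>
          decide (PySem.List.pyGetD (arr.map (fun s => pvMask s.toList result.toList)) i 0 &&&
                  PySem.List.pyGetD (arr.map (fun s => pvMask s.toList result.toList)) j 0 = 0)) : Nat) : Int)) 0
      (fun acc x _ => PySem.List.foldl_ite_add_one _ _ _)).trans ?_
  rw [PySem.List.foldl_add, zero_add]

theorem pv_pairs_eq (arr : List String) :
    (PySem.List.pyRange 0 (arr.length : Int) 1).foldl (fun ps p1 =>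
      (PySem.List.pyRange (p1 + 1) (arr.length : Int) 1).foldl (fun ps p2 =>
        ps ++ [(PySem.List.pyGetD arr p1 "", PySem.List.pyGetD arr p2 "")]) ps) []
    = (PySem.List.pyRange 0 (arr.length : Int) 1).flatMap (fun p1 =>
      (PySem.List.pyRange (p1 + 1) (arr.length : Int) 1).map (fun p2 =>
        (PySem.List.pyGetD arr p1 "", PySem.List.pyGetD arr p2 ""))) := by
  refine (PySem.List.foldl_congr_mem _ _ (fun ps p1 =>
      ps ++ (PySem.List.pyRange (p1 + 1) (arr.length : Int) 1).map (fun p2 =>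
        (PySem.List.pyGetD arr p1 "", PySem.List.pyGetD arr p2 ""))) []
      (fun acc x _ => PySem.List.foldl_append_singleton_eq_map _ _ _)).trans ?_
  rw [PySem.List.foldl_append_eq_flatMap, List.nil_append]

theorem pv_A_eq (arr : List String) (result : String) :
    stringsCrossover arr result =
      ((PySem.List.pyRange 0 (arr.length : Int) 1).map (fun i =>
        (((PySem.List.pyRange (i + 1) (arr.length : Int) 1).countP (fun j =>
          !(decide (pvT arr result i j = false))) : Nat) : Int))).sum := by
  simp only [stringsCrossover]
  rw [pv_pairs_eq]
  rw [PySem.List.foldl_ite_add_one (fun pair : String × String =>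
    ((PySem.List.pyRange 0 (PySem.Str.len pair.1) 1).foldl (fun t idx =>
      if ¬ (PySem.List.pyGetD pair.2.toList idx ' ' = PySem.List.pyGetD result.toList idx ' ' ∨
            PySem.List.pyGetD pair.1.toList idx ' ' = PySem.List.pyGetD result.toList idx ' ')
      then false else t) true) = false)]
  rw [zero_add]
  rw [List.length_eq_countP_add_countP (p := fun pair : String × String =>
    decide (((PySem.List.pyRange 0 (PySem.Str.len pair.1) 1).foldl (fun t idx =>
      if ¬ (PySem.List.pyGetD pair.2.toList idx ' ' = PySem.List.pyGetD result.toList idx ' ' ∨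
            PySem.List.pyGetD pair.1.toList idx ' ' = PySem.List.pyGetD result.toList idx ' ')
      then false else t) true) = false))]
  push_cast
  ring_nf
  rw [List.countP_flatMap, Nat.cast_list_sum, List.map_map]
  congr 1
  apply List.map_congr_left
  intro i _
  simp only [Function.comp]
  rw [List.countP_map]
  congr 1
  apply List.countP_congr
  intro j _
  simp only [Function.comp, pvT]
  constructor
  · intro h
    simp only [decide_eq_true_eq] at h
    simp only [Bool.not_eq_true', decide_eq_false_iff_not]
    exact h
  · intro h
    simp only [Bool.not_eq_true', decide_eq_false_iff_not] at h
    simp only [decide_eq_true_eq]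
    exact h

theorem pv_point (arr : List String) (result : String)
    (hpre : Pre_stringsCrossover arr result) (i j : Int)
    (hi : 0 ≤ i) (hij : i < j) (hj : j < (arr.length : Int)) :
    (!(decide (pvT arr result i j = false)))
      = decide (PySem.List.pyGetD (arr.map (fun s => pvMask s.toList result.toList)) i 0 &&&
                PySem.List.pyGetD (arr.map (fun s => pvMask s.toList result.toList)) j 0 = 0) := by
  have hgi : PySem.List.pyGetD arr i "" = arr[i.toNat] :=
    PySem.List.pyGetD_eq_getElem arr "" hi (by omega)
  have hgj : PySem.List.pyGetD arr j "" = arr[j.toNat] :=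
    PySem.List.pyGetD_eq_getElem arr "" (by omega) hj
  have hmi : PySem.List.pyGetD (arr.map (fun s => pvMask s.toList result.toList)) i 0
      = pvMask (arr[i.toNat]).toList result.toList := by
    rw [PySem.List.pyGetD_eq_getElem _ _ hi (by simp; omega)]
    simp
  have hmj : PySem.List.pyGetD (arr.map (fun s => pvMask s.toList result.toList)) j 0
      = pvMask (arr[j.toNat]).toList result.toList := by
    rw [PySem.List.pyGetD_eq_getElem _ _ (by omega) (by simp; omega)]
    simp
  have hab : (arr[i.toNat]).toList.length ≤ (arr[j.toNat]).toList.length :=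
    List.pairwise_iff_getElem.mp hpre.1 i.toNat j.toNat (by omega) (by omega) (by omega)
  have har : (arr[i.toNat]).toList.length ≤ result.toList.length := by
    apply hpre.2
    have hlt : i.toNat < arr.dropLast.length := by
      rw [List.length_dropLast]; omega
    have hmem : arr.dropLast[i.toNat] ∈ arr.dropLast := List.getElem_mem hlt
    rwa [List.getElem_dropLast] at hmem
  have hT : pvT arr result i j
      = !((PySem.List.pyRange 0 ((arr[i.toNat]).toList.length : Int) 1).any (fun idx =>
          decide (¬ (PySem.List.pyGetD (arr[j.toNat]).toList idx ' ' = PySem.List.pyGetD result.toList idx ' ' ∨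
                     PySem.List.pyGetD (arr[i.toNat]).toList idx ' ' = PySem.List.pyGetD result.toList idx ' ')))) := by
    unfold pvT
    rw [hgi, hgj, PySem.Str.len_eq]
    have hfold := PySem.List.foldl_if_false_eq (fun idx =>
      decide (¬ (PySem.List.pyGetD (arr[j.toNat]).toList idx ' ' = PySem.List.pyGetD result.toList idx ' ' ∨
                 PySem.List.pyGetD (arr[i.toNat]).toList idx ' ' = PySem.List.pyGetD result.toList idx ' ')))
      (PySem.List.pyRange 0 ((arr[i.toNat]).toList.length : Int) 1) true
    simp only [decide_eq_true_eq, Bool.true_and] at hfold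
    exact hfold
  rw [hT, hmi, hmj]
  have hnn : ∀ b : Bool, (!(decide ((!b) = false))) = !b := by decide
  rw [hnn]
  exact pv_good_eq _ _ _ hab har

-- ===== VERDICT (by name: the statement is the Claim_ definition above) =====
theorem stringsCrossover_spec : Claim_equal_stringsCrossover := by
  intro arr result _ hpre
  unfold Spec_stringsCrossover
  rw [pv_A_eq, pv_B_eq]
  congr 1
  apply List.map_congr_left
  intro i hi
  rw [PySem.List.mem_pyRange_one] at hi
  congr 1
  apply List.countP_congr
  intro j hj
  rw [PySem.List.mem_pyRange_one] at hj
  rw [pv_point arr result hpre i j hi.1 hj.1 hj.2]
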